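-- pv_equiv track=rewrite | github.com/achyuthrachur/DCF---Deposits | src/ui/web_app.py | _infer_defaults
-- ===== SOURCE A (Python) =====
-- from typing import Any, Callable, Dict, Iterable, List, Optional, Tuple
--
-- REQUIRED_FIELDS = {
--     "account_id": "Unique account identifier",
--     "balance": "Current balance",
--     "interest_rate": "Current interest rate (decimal)",
-- }
--
-- OPTIONAL_FIELDS = {
--     "account_type": "Account type (for segmentation)",
--     "customer_segment": "Customer segment (for segmentation)",
--     "rate_type": "Rate type metadata (optional)",
-- }
--
-- def _infer_defaults(columns: Iterable[str]) -> Dict[str, str]: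
--     """Suggest mappings based on simple column name matching."""
--     mapping: Dict[str, str] = {}
--     lower = {col.lower(): col for col in columns}
--     for canonical in list(REQUIRED_FIELDS) + list(OPTIONAL_FIELDS):
--         canonical_no_underscore = canonical.replace("_", "")
--         for candidate, original in lower.items():
--             if candidate == canonical or candidate.replace("_", "") == canonical_no_underscore:
--                 mapping[canonical] = original
--                 break
--     return mapping
-- ===== SOURCE B (Python) =====
-- from typing import Dict, Iterable
--
-- REQUIRED_FIELDS = {
--     "account_id": "Unique account identifier",
--     "balance": "Current balance",
--     "interest_rate": "Current interest rate (decimal)",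
-- }
--
-- OPTIONAL_FIELDS = {
--     "account_type": "Account type (for segmentation)",
--     "customer_segment": "Customer segment (for segmentation)",
--     "rate_type": "Rate type metadata (optional)",
-- }
--
-- def _infer_defaults(columns: Iterable[str]) -> Dict[str, str]:
--     """Suggest mappings based on simple column name matching."""
--     fields = list(REQUIRED_FIELDS) + list(OPTIONAL_FIELDS)
--     field_index = {canonical.replace("_", ""): canonical for canonical in fields}
--     lower = {col.lower(): col for col in columns}
--     found: Dict[str, str] = {}
--     for candidate, original in lower.items():
--         canonical = field_index.get(candidate.replace("_", ""))
--         if canonical is not None and canonical not in found: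
--             found[canonical] = original
--     return {canonical: found[canonical] for canonical in fields if canonical in found}
-- ===== Notes on version B (the rewrite author's own statement) =====
-- stated objective: alternative
-- what changed: Replaces the per-canonical-field nested scan over the columns with a precomputed normalized-name index and a single first-wins pass over the deduplicated lowercased columns, followed by emitting the hits in canonical field order.
import Mathlib
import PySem

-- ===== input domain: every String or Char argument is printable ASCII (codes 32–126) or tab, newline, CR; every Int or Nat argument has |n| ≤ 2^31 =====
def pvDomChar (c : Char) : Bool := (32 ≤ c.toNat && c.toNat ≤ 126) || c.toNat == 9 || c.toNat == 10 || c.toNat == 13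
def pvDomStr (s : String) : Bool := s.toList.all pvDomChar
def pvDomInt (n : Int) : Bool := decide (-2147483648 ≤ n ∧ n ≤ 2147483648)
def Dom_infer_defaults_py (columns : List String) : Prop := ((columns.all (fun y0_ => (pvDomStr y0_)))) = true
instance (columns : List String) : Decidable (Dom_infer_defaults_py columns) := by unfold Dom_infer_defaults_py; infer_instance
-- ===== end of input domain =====

-- B replaces A's per-field nested scan over the columns by a normalized-name index and one
-- first-wins pass over the deduplicated lowercased columns, then emits hits in field order.

-- list(REQUIRED_FIELDS) + list(OPTIONAL_FIELDS), shared by both ports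
def pvFields : List String :=
  ["account_id", "balance", "interest_rate", "account_type", "customer_segment", "rate_type"]

-- s.replace("_", ""), shared by both ports
def pvStrip (s : String) : String := PySem.Str.replace s "_" ""

-- ===== PORT A =====
def infer_defaults_py (columns : List String) : List (String × String) :=
  let lower : PySem.Dict String String :=
    columns.foldl (fun d col => d.insert (PySem.Str.lower col) col) PySem.Dict.empty
  let mapping : PySem.Dict String String :=
    pvFields.foldl (fun m canonical =>
      -- inner 'for candidate, original in lower.items(): if …: mapping[canonical] = original; break'
      match lower.items.find?
          (fun p => p.1 == canonical || pvStrip p.1 == pvStrip canonical) with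
      | some p => m.insert canonical p.2
      | none => m) PySem.Dict.empty
  mapping.items

-- ===== PORT B =====
-- field_index = {canonical.replace("_",""): canonical for canonical in fields}
def pvFieldIndex : PySem.Dict String String :=
  pvFields.foldl (fun d c => d.insert (pvStrip c) c) PySem.Dict.empty

def infer_defaults_py_alt (columns : List String) : List (String × String) :=
  let lower : PySem.Dict String String :=
    columns.foldl (fun d col => d.insert (PySem.Str.lower col) col) PySem.Dict.empty
  let found : PySem.Dict String String :=
    lower.items.foldl (fun f p =>
      match pvFieldIndex.get? (pvStrip p.1) with
      | some canonical => if f.contains canonical then f else f.insert canonical p.2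
      | none => f) PySem.Dict.empty
  -- {canonical: found[canonical] for canonical in fields if canonical in found}
  (pvFields.foldl (fun r c =>
      match found.get? c with
      | some v => r.insert c v
      | none => r) PySem.Dict.empty).items

-- ===== PRECONDITION & SPEC =====
def Spec_infer_defaults_py (columns : List String) (out : List (String × String)) : Prop := out = infer_defaults_py_alt columns
instance (columns : List String) (out : List (String × String)) : Decidable (Spec_infer_defaults_py columns out) := by unfold Spec_infer_defaults_py; infer_instance

-- ===== CLAIM (what is proved, stated in full; the proofs are below) =====
def Claim_equal_infer_defaults_py : Prop := ∀ (columns : List String), Dom_infer_defaults_py columns → Spec_infer_defaults_py columns (infer_defaults_py columns)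

-- ===== LEMMAS AND PROOFS =====

theorem pv_get?_mk_nil (s : String) :
    (PySem.Dict.mk ([] : List (String × String))).get? s = none := rfl

-- the index hits every canonical field at exactly its stripped name
theorem pvFieldIndex_hit (c : String) (hc : c ∈ pvFields) :
    pvFieldIndex.get? (pvStrip c) = some c := by
  fin_cases hc <;> decide

-- and a hit determines the looked-up string
theorem pvFieldIndex_get_inv (s c : String) (h : pvFieldIndex.get? s = some c) :
    s = pvStrip c := by
  have hfi : pvFieldIndex = PySem.Dict.mk
      [("accountid", "account_id"), ("balance", "balance"), ("interestrate", "interest_rate"),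
       ("accounttype", "account_type"), ("customersegment", "customer_segment"),
       ("ratetype", "rate_type")] := by decide
  rw [hfi] at h
  simp only [PySem.Dict.get?_mk_cons, pv_get?_mk_nil] at h
  split_ifs at h with h1 h2 h3 h4 h5 h6
  · injection h with h; subst h; exact (eq_of_beq h1).symm.trans (by decide)
  · injection h with h; subst h; exact (eq_of_beq h2).symm.trans (by decide)
  · injection h with h; subst h; exact (eq_of_beq h3).symm.trans (by decide)
  · injection h with h; subst h; exact (eq_of_beq h4).symm.trans (by decide)
  · injection h with h; subst h; exact (eq_of_beq h5).symm.trans (by decide)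
  · injection h with h; subst h; exact (eq_of_beq h6).symm.trans (by decide)

-- A's match predicate collapses to the stripped-name comparison
theorem pv_pred_eq (c : String) :
    (fun p : String × String => p.1 == c || pvStrip p.1 == pvStrip c)
      = (fun p : String × String => pvStrip p.1 == pvStrip c) := by
  funext p
  by_cases h : p.1 = c
  · subst h; simp
  · simp [h]

-- B's single pass records, for each canonical field c, the first stripped match in the items
theorem pv_found_get (c : String) (hc : c ∈ pvFields) (items : List (String × String))
    (f : PySem.Dict String String) :
    (items.foldl (fun f p =>
        match pvFieldIndex.get? (pvStrip p.1) with
        | some canonical => if f.contains canonical then f else f.insert canonical p.2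
        | none => f) f).get? c
      = (f.get? c).or ((items.find? (fun p => pvStrip p.1 == pvStrip c)).map Prod.snd) := by
  induction items generalizing f with
  | nil => simp
  | cons p items ih =>
    simp only [List.foldl_cons, List.find?_cons]
    cases hfi : pvFieldIndex.get? (pvStrip p.1) with
    | none =>
      have hne : (pvStrip p.1 == pvStrip c) = false := by
        by_cases h : pvStrip p.1 = pvStrip c
        · rw [h, pvFieldIndex_hit c hc] at hfi; simp at hfi
        · simpa using h
      simp only [hne]
      exact ih f
    | some c' =>
      by_cases hcc : c' = c
      · rw [hcc] at hfi ⊢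
        have hst : pvStrip p.1 = pvStrip c := pvFieldIndex_get_inv _ _ hfi
        have htr : (pvStrip p.1 == pvStrip c) = true := by simpa using hst
        simp only [htr]
        by_cases hcon : f.contains c = true
        · simp only [hcon, if_true, ih]
          have hsome : (f.get? c).isSome = true := by
            rw [← PySem.Dict.contains_eq_isSome_get?]; exact hcon
          obtain ⟨v, hv⟩ := Option.isSome_iff_exists.mp hsome
          simp [hv]
        · have hnone : f.get? c = none := by
            rcases h : f.get? c with _ | v
            · rfl
            · exact absurd (by rw [PySem.Dict.contains_eq_isSome_get?, h]; rfl) hcon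
          simp only [hcon, ih, Bool.false_eq_true, if_false]
          simp [PySem.Dict.get?_insert_self, hnone]
      · have hne : (pvStrip p.1 == pvStrip c) = false := by
          by_cases h : pvStrip p.1 = pvStrip c
          · rw [h, pvFieldIndex_hit c hc] at hfi
            exact (hcc (Option.some.inj hfi).symm).elim
          · simpa using h
        simp only [hne]
        by_cases hcon : f.contains c' = true
        · simp only [hcon, if_true]; exact ih f
        · simp only [hcon, Bool.false_eq_true, if_false, ih]
          rw [PySem.Dict.get?_insert_of_ne _ _ (Ne.symm hcc)]

-- ===== VERDICT (by name: the statement is the Claim_ definition above) =====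
theorem infer_defaults_py_spec : Claim_equal_infer_defaults_py := by
  intro columns _
  unfold Spec_infer_defaults_py infer_defaults_py infer_defaults_py_alt
  dsimp only
  congr 1
  apply List.foldl_ext
  intro m c hc
  rw [pv_pred_eq c, pv_found_get c hc _ PySem.Dict.empty]
  cases hfind : List.find? (fun p => pvStrip p.1 == pvStrip c)
      ((columns.foldl (fun d col => d.insert (PySem.Str.lower col) col) PySem.Dict.empty).items) with
  | none => simp [PySem.Dict.get?_empty]
  | some p => simp [PySem.Dict.get?_empty]
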